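-- pv_equiv track=rewrite | github.com/Jerenyaoyelu/makemerich | core/selection_tags.py | _consecutive_streak
-- ===== SOURCE A (Python) =====
-- def _consecutive_streak(per_run_syms: list[set[str]], symbol: str) -> int:
--     c = 0
--     for sset in reversed(per_run_syms):
--         if symbol in sset:
--             c += 1
--         else:
--             break
--     return c
-- ===== SOURCE B (Python) =====
-- def _consecutive_streak(per_run_syms: list[set[str]], symbol: str) -> int:
--     last_absent = -1
--     for i, sset in enumerate(per_run_syms):
--         if symbol not in sset:
--             last_absent = i
--     return len(per_run_syms) - last_absent - 1
-- ===== Notes on version B (the rewrite author's own statement) =====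
-- stated objective: alternative
-- what changed: Replaces the reversed scan with an early break by a single forward pass that records the index of the last run missing the symbol, returning the trailing streak as len - last_absent - 1 by arithmetic.
import Mathlib
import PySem

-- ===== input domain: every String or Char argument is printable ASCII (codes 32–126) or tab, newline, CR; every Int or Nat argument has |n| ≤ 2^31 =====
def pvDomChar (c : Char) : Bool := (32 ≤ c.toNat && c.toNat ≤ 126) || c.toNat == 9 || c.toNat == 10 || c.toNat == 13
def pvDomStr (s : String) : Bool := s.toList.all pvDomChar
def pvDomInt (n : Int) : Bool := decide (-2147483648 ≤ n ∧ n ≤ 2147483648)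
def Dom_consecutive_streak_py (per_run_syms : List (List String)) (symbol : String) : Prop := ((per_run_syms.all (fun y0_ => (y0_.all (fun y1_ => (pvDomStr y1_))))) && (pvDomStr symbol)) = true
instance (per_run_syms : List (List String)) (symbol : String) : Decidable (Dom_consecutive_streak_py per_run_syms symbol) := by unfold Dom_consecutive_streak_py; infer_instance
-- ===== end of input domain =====

-- B does one forward pass recording the index of the last run missing the symbol and returns
-- the streak length arithmetically, instead of A's reversed scan with an early break.

-- ===== PORT A =====
-- A: c = 0; for sset in reversed(per_run_syms): if symbol in sset: c += 1 else: break; return c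
def consecutive_streak_py_go (symbol : String) : List (List String) → Int
  | [] => 0
  | sset :: rest => if symbol ∈ sset then 1 + consecutive_streak_py_go symbol rest else 0

def consecutive_streak_py (per_run_syms : List (List String)) (symbol : String) : Int :=
  consecutive_streak_py_go symbol per_run_syms.reverse

-- ===== PORT B =====
-- B: last_absent = -1; for i, sset in enumerate(l): if symbol not in sset: last_absent = i
--    return len(l) - last_absent - 1
def consecutive_streak_py_alt (per_run_syms : List (List String)) (symbol : String) : Int :=
  let last_absent :=
    (PySem.List.enumerate per_run_syms 0).foldl
      (fun acc p => if symbol ∉ p.2 then p.1 else acc) (-1)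
  (per_run_syms.length : Int) - last_absent - 1

-- ===== PRECONDITION & SPEC =====
def Spec_consecutive_streak_py (per_run_syms : List (List String)) (symbol : String) (out : Int) : Prop := out = consecutive_streak_py_alt per_run_syms symbol
instance (per_run_syms : List (List String)) (symbol : String) (out : Int) : Decidable (Spec_consecutive_streak_py per_run_syms symbol out) := by unfold Spec_consecutive_streak_py; infer_instance

-- ===== CLAIM (what is proved, stated in full; the proofs are below) =====
def Claim_equal_consecutive_streak_py : Prop := ∀ (per_run_syms : List (List String)) (symbol : String), Dom_consecutive_streak_py per_run_syms symbol → Spec_consecutive_streak_py per_run_syms symbol (consecutive_streak_py per_run_syms symbol)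

-- ===== LEMMAS AND PROOFS =====

def pvLA (symbol : String) (l : List (List String)) : Int :=
  (PySem.List.enumerate l 0).foldl (fun acc p => if symbol ∉ p.2 then p.1 else acc) (-1)

theorem pvLA_append (symbol : String) (l : List (List String)) (x : List String) :
    pvLA symbol (l ++ [x]) =
      if symbol ∉ x then (l.length : Int) else pvLA symbol l := by
  unfold pvLA
  rw [PySem.List.enumerate_append, List.foldl_append]
  simp [PySem.List.enumerate]

theorem pvGo_eq (symbol : String) (l : List (List String)) :
    consecutive_streak_py_go symbol l.reverse =
      (l.length : Int) - pvLA symbol l - 1 := by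
  induction l using List.reverseRecOn with
  | nil => simp [consecutive_streak_py_go, pvLA, PySem.List.enumerate]
  | append_singleton l x ih =>
    rw [pvLA_append]
    simp only [List.reverse_append, List.reverse_singleton, List.singleton_append,
      consecutive_streak_py_go, List.length_append, List.length_singleton]
    split_ifs with h
    · rw [ih]; push_cast; ring
    · push_cast; ring

-- ===== VERDICT (by name: the statement is the Claim_ definition above) =====
theorem consecutive_streak_py_spec : Claim_equal_consecutive_streak_py := by
  intro l s _
  show consecutive_streak_py l s = consecutive_streak_py_alt l s
  unfold consecutive_streak_py consecutive_streak_py_alt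
  exact pvGo_eq s l
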